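-- pv_equiv track=rewrite | github.com/jschuringa/twodice | search/search.py | cultureMatchSingle
-- ===== SOURCE A (Python) =====
-- def cultureMatchSingle(userCulture, studCulture):
--     cultureScore = 0
--     for i in range(0, len(userCulture)):
--         for j in range(0, len(studCulture)):
--             if userCulture[i] == studCulture[j]:
--                 cultureScore += abs(i - j)
--     cultureScore = 100 - cultureScore * 2
--     return cultureScore
-- ===== SOURCE B (Python) =====
-- def cultureMatchSingle(userCulture, studCulture):
--     pos = {}
--     for j, v in enumerate(studCulture):
--         pos.setdefault(v, []).append(j)
--     total = 0
--     for i, v in enumerate(userCulture):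
--         for j in pos.get(v, []):
--             total += abs(i - j)
--     return 100 - 2 * total
-- ===== Notes on version B (the rewrite author's own statement) =====
-- stated objective: faster
-- what changed: B builds a dictionary mapping each student-culture value to its list of positions in one pass, so the inner scan over all of studCulture for every userCulture element disappears; only actually-matching positions are visited.
import Mathlib
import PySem

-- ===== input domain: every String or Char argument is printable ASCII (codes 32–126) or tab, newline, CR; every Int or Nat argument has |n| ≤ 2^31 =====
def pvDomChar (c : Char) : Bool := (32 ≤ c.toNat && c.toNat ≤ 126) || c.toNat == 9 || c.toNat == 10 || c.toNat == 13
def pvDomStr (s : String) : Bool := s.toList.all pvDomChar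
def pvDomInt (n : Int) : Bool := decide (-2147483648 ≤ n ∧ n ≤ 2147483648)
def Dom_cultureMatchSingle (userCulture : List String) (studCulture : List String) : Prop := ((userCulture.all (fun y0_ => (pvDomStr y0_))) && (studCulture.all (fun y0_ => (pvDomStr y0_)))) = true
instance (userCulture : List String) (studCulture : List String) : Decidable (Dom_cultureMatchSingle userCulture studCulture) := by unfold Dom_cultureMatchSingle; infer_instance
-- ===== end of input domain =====

-- B indexes studCulture positions by value once, replacing A's inner scan of all of
-- studCulture per element; faster when matches are sparse (objective: faster).

-- ===== PORT A =====
def cultureMatchSingle (userCulture : List String) (studCulture : List String) : Int :=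
  let cultureScore : Int :=
    (PySem.List.pyRange 0 userCulture.length 1).foldl (fun acc i =>
      (PySem.List.pyRange 0 studCulture.length 1).foldl (fun acc2 j =>
        if PySem.List.pyGetD userCulture i "" == PySem.List.pyGetD studCulture j ""
        then acc2 + |i - j| else acc2) acc) 0
  100 - cultureScore * 2

-- ===== PORT B =====
-- pos.setdefault(v, []).append(j)  ==  modify v with default [] appending j (exact)
def cultureMatchSingle_alt (userCulture : List String) (studCulture : List String) : Int :=
  let pos : PySem.Dict String (List Int) :=
    (PySem.List.enumerate studCulture).foldl
      (fun d p => d.modify p.2 [] (fun l => l ++ [p.1])) PySem.Dict.empty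
  let total : Int :=
    (PySem.List.enumerate userCulture).foldl (fun acc p =>
      (pos.getD p.2 []).foldl (fun a j => a + |p.1 - j|) acc) 0
  100 - 2 * total

-- ===== PRECONDITION & SPEC =====
def Spec_cultureMatchSingle (userCulture : List String) (studCulture : List String) (out : Int) : Prop := out = cultureMatchSingle_alt userCulture studCulture
instance (userCulture : List String) (studCulture : List String) (out : Int) : Decidable (Spec_cultureMatchSingle userCulture studCulture out) := by unfold Spec_cultureMatchSingle; infer_instance

-- ===== CLAIM (what is proved, stated in full; the proofs are below) =====
def Claim_equal_cultureMatchSingle : Prop := ∀ (userCulture : List String) (studCulture : List String), Dom_cultureMatchSingle userCulture studCulture → Spec_cultureMatchSingle userCulture studCulture (cultureMatchSingle userCulture studCulture)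

-- ===== LEMMAS AND PROOFS =====

-- the position dictionary looks up to exactly the matching indices of the enumeration
theorem pos_getD (l : List (Int × String)) (d : PySem.Dict String (List Int)) (v : String) :
    ((l.foldl (fun d p => d.modify p.2 [] (fun l => l ++ [p.1])) d).getD v [])
      = d.getD v [] ++ l.filterMap (fun p => if p.2 = v then some p.1 else none) := by
  induction l generalizing d with
  | nil => simp
  | cons p l ih =>
    simp only [List.foldl_cons, List.filterMap_cons, ih, PySem.Dict.getD_modify]
    by_cases h : p.2 = v
    · subst h; simp
    · simp [h, Ne.symm h]

theorem foldl_filterMap_if {α : Type} (l : List (Int × α)) (f : Int × α → Option Int)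
    (g : Int → Int → Int) (acc : Int) :
    (l.filterMap f).foldl g acc = l.foldl (fun a p => (f p).elim a (g a)) acc := by
  induction l generalizing acc with
  | nil => rfl
  | cons p l ih => cases h : f p <;> simp [h, ih]

theorem inner_eq (studCulture : List String) (i : Int) (v : String) (acc : Int) :
    (PySem.List.pyRange 0 studCulture.length 1).foldl (fun acc2 j =>
        if v == PySem.List.pyGetD studCulture j "" then acc2 + |i - j| else acc2) acc
    = (((PySem.List.enumerate studCulture).foldl
          (fun d p => d.modify p.2 [] (fun l => l ++ [p.1])) PySem.Dict.empty).getD v []).foldl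
        (fun a j => a + |i - j|) acc := by
  rw [pos_getD]
  simp only [PySem.Dict.getD_empty, List.nil_append]
  rw [foldl_filterMap_if, PySem.List.enumerate_eq_map_pyRange (d := ""), List.foldl_map]
  apply PySem.List.foldl_congr_mem
  intro a p _
  by_cases h : v = PySem.List.pyGetD studCulture p ""
  · simp [h]
  · simp [h, Ne.symm h]

-- ===== VERDICT (by name: the statement is the Claim_ definition above) =====
theorem cultureMatchSingle_spec : Claim_equal_cultureMatchSingle := by
  intro u s _
  show _ = _
  unfold cultureMatchSingle cultureMatchSingle_alt
  simp only []
  have : ∀ (acc i : Int),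
      (PySem.List.pyRange 0 s.length 1).foldl (fun acc2 j =>
        if PySem.List.pyGetD u i "" == PySem.List.pyGetD s j "" then acc2 + |i - j| else acc2) acc
      = (((PySem.List.enumerate s).foldl
            (fun d p => d.modify p.2 [] (fun l => l ++ [p.1])) PySem.Dict.empty).getD
            (PySem.List.pyGetD u i "") []).foldl (fun a j => a + |i - j|) acc := by
    intro acc i; exact inner_eq s i (PySem.List.pyGetD u i "") acc
  simp only [this]
  rw [show PySem.List.enumerate u = (PySem.List.pyRange 0 u.length 1).map (fun i => (i, PySem.List.pyGetD u i "")) from by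
        simpa using PySem.List.enumerate_eq_map_pyRange (xs := u) (d := ""), List.foldl_map]
  ring_nf
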